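-- pv_equiv track=rewrite | github.com/jaewoopenn/simul | p_basic/demand/dbf3.py | calculate_sbf
-- ===== SOURCE A (Python) =====
-- SUPPLY_PROFILE = [
--     (10, 15),
--     (20, 25),
--     (None, 15)
-- ]
--
-- def calculate_sbf(t):
--     """
--     유연한 Supply Bound Function (SBF) 계산
--     주어진 공급 프로필(profile)에 따라 시간 t까지의 누적 공급량(에너지)을 계산
--     """
--     total_supply = 0
--     current_time_cursor = 0  # 계산을 시작할 기준 시간
--
--     for end_time, capacity in SUPPLY_PROFILE:
--         # 이미 시간 t에 도달했으면 계산 종료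
--         if t <= current_time_cursor:
--             break
--
--         # 이번 구간에서 계산할 종료 시점 결정
--         # end_time이 None이면(마지막 구간), 그냥 t까지 계산
--         if end_time is None:
--             limit = t
--         else:
--             limit = min(t, end_time)
--
--         # 이번 구간의 지속 시간(Duration)
--         duration = limit - current_time_cursor
--
--         # 누적 공급량 추가 (시간 * 용량)
--         if duration > 0:
--             total_supply += duration * capacity
--
--         # 기준 시간을 이번 구간 끝으로 업데이트
--         current_time_cursor = limit
--
--         # 만약 이번 구간 끝이 목표 시간 t보다 크거나 같다면 루프 종료
--         if current_time_cursor >= t: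
--             break
--
--     return total_supply
-- ===== SOURCE B (Python) =====
-- def calculate_sbf(t):
--     # Closed-form piecewise evaluation using precomputed cumulative breakpoints.
--     if t <= 0:
--         return 0
--     if t <= 10:
--         return 15 * t
--     if t <= 20:
--         return 150 + 25 * (t - 10)
--     return 400 + 15 * (t - 20)
-- ===== Notes on version B (the rewrite author's own statement) =====
-- stated objective: simpler
-- what changed: Replaced the cursor-driven loop over SUPPLY_PROFILE with a direct closed-form piecewise evaluation using precomputed cumulative values at the breakpoints.
import Mathlib
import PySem

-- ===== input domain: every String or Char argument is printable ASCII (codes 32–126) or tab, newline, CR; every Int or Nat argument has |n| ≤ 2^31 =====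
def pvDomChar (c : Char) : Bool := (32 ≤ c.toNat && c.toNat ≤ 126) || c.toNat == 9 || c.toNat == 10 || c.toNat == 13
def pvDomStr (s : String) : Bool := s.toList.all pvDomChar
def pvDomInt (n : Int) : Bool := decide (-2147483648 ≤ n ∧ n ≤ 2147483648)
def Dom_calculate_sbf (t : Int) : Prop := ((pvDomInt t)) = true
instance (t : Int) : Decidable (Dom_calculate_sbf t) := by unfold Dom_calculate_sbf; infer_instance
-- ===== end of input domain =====

-- B replaces A's cursor-driven loop over SUPPLY_PROFILE with a closed-form piecewise formula (objective: simpler).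

-- ===== PORT A =====
def pvSupplyProfile : List (Option Int × Int) := [(some 10, 15), (some 20, 25), (none, 15)]

-- the for-loop with its two breaks, as structural recursion over the profile
def calculate_sbf_loop (t : Int) : List (Option Int × Int) → Int → Int → Int
  | [], total_supply, _ => total_supply
  | (end_time, capacity) :: rest, total_supply, cursor =>
    if t ≤ cursor then total_supply
    else
      let limit := match end_time with
        | none => t
        | some e => min t e
      let duration := limit - cursor
      let total' := if duration > 0 then total_supply + duration * capacity else total_supply
      if limit ≥ t then total' else calculate_sbf_loop t rest total' limit

def calculate_sbf (t : Int) : Int := calculate_sbf_loop t pvSupplyProfile 0 0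

-- ===== PORT B =====
def calculate_sbf_alt (t : Int) : Int :=
  if t ≤ 0 then 0
  else if t ≤ 10 then 15 * t
  else if t ≤ 20 then 150 + 25 * (t - 10)
  else 400 + 15 * (t - 20)

-- ===== PRECONDITION & SPEC =====
def Spec_calculate_sbf (t : Int) (out : Int) : Prop := out = calculate_sbf_alt t
instance (t : Int) (out : Int) : Decidable (Spec_calculate_sbf t out) := by unfold Spec_calculate_sbf; infer_instance

-- ===== CLAIM (what is proved, stated in full; the proofs are below) =====
def Claim_equal_calculate_sbf : Prop := ∀ (t : Int), Dom_calculate_sbf t → Spec_calculate_sbf t (calculate_sbf t)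

-- ===== LEMMAS AND PROOFS =====

-- ===== VERDICT (by name: the statement is the Claim_ definition above) =====
theorem calculate_sbf_spec : Claim_equal_calculate_sbf := by
  intro t _
  unfold Spec_calculate_sbf calculate_sbf calculate_sbf_alt pvSupplyProfile
  simp only [calculate_sbf_loop]
  split_ifs <;> omega
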